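-- pv_equiv track=rewrite | github.com/HandHerH/------ | Kmp.py | get_position_next_value
-- ===== SOURCE A (Python) =====
-- def get_position_next_value(s, position):  # 计算第position个元素的最小公共前后缀
--     s_head = s[:position]
--     j = 1
--     while j <= len(s_head):
--         if s_head[0:j] == s_head[-j:]:
--             j = j + 1
--             continue
--         else:
--             return j - 1
--     return 0
-- ===== SOURCE B (Python) =====
-- def get_position_next_value(s, position):
--     # O(n): the first j prefixes all equal the corresponding suffixes exactly
--     # when the first j and last j characters all equal s[0]; so the answer is
--     # min(front-run, back-run) of the first character, or 0 if the head is
--     # a single repeated character (A's loop then runs off the end and returns 0).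
--     h = s[:position]
--     n = len(h)
--     if n == 0:
--         return 0
--     c = h[0]
--     a = 0
--     while a < n and h[a] == c:
--         a += 1
--     if a == n:
--         return 0
--     b = 0
--     while b < n and h[n - 1 - b] == c:
--         b += 1
--     return min(a, b)
-- ===== Notes on version B (the rewrite author's own statement) =====
-- stated objective: faster
-- what changed: Replaced A's loop that compares a length-j prefix slice with a length-j suffix slice for every j (O(n^2)) by a single O(n) scan: all prefixes up to length j match the suffixes iff the first j and last j characters all equal the first character, so the answer is min(front-run, back-run) of the first character, or 0 when the whole head is one repeated character.
import Mathlib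
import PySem

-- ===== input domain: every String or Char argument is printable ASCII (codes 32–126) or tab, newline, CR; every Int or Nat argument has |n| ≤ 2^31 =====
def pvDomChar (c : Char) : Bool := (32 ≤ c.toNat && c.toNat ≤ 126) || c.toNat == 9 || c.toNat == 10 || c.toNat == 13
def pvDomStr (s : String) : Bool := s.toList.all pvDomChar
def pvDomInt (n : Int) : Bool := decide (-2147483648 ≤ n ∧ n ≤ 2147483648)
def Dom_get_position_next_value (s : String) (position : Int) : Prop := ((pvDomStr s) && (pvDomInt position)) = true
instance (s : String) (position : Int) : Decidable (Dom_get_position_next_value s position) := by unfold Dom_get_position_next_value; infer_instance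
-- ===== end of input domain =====

-- B replaces A's quadratic prefix/suffix-slice loop by an O(n) scan of the first
-- character's run lengths at both ends (answer = min of the two runs, 0 if the
-- whole head is one repeated character).


-- ===== PORT A =====
-- while j <= len(s_head): if s_head[0:j] == s_head[-j:]: j += 1 else: return j-1; after loop: return 0
def pvALoop (h : List Char) (j : Nat) : Int :=
  if _hle : j ≤ h.length then
    if PySem.List.slice h (some 0) (some (j : Int)) =
       PySem.List.slice h (some (-(j : Int))) none then
      pvALoop h (j + 1)
    else
      (j : Int) - 1
  else 0
termination_by h.length + 1 - j
decreasing_by omega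

def get_position_next_value (s : String) (position : Int) : Int :=
  let s_head := PySem.List.slice s.toList none (some position)   -- s[:position]
  pvALoop s_head 1

-- ===== PORT B =====
-- while a < n and h[a] == c: a += 1
def pvFront (h : List Char) (c : Char) (a : Nat) : Nat :=
  if ha : a < h.length then
    if h[a] = c then pvFront h c (a + 1) else a
  else a
termination_by h.length - a
decreasing_by omega

-- while b < n and h[n-1-b] == c: b += 1
def pvBack (h : List Char) (c : Char) (b : Nat) : Nat :=
  if hb : b < h.length then
    if h[h.length - 1 - b]'(by omega) = c then pvBack h c (b + 1) else b
  else b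
termination_by h.length - b
decreasing_by omega

def get_position_next_value_alt (s : String) (position : Int) : Int :=
  let h := PySem.List.slice s.toList none (some position)   -- s[:position]
  if h.length = 0 then 0
  else
    let c := h.headI                                        -- c = h[0] (h nonempty here)
    let a := pvFront h c 0
    if a = h.length then 0
    else ((min a (pvBack h c 0) : Nat) : Int)

-- ===== PRECONDITION & SPEC =====
def Spec_get_position_next_value (s : String) (position : Int) (out : Int) : Prop := out = get_position_next_value_alt s position
instance (s : String) (position : Int) (out : Int) : Decidable (Spec_get_position_next_value s position out) := by unfold Spec_get_position_next_value; infer_instance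

-- ===== CLAIM (what is proved, stated in full; the proofs are below) =====
def Claim_equal_get_position_next_value : Prop := ∀ (s : String) (position : Int), Dom_get_position_next_value s position → Spec_get_position_next_value s position (get_position_next_value s position)

-- ===== LEMMAS AND PROOFS =====

theorem front_le (l : List Char) (c : Char) (a : Nat) (h : a ≤ l.length) : pvFront l c a ≤ l.length := by
  fun_induction pvFront l c a <;> omega

theorem front_mem (l : List Char) (c : Char) (a : Nat) :
    ∀ i (hi : i < l.length), a ≤ i → i < pvFront l c a → l[i] = c := by
  fun_induction pvFront l c a with
  | case1 a ha hc ih =>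
      intro i hi hai hif
      rcases Nat.eq_or_lt_of_le hai with rfl | hlt
      · exact hc
      · exact ih i hi hlt hif
  | case2 a ha hc =>
      intro i hi hai hif; omega
  | case3 a ha =>
      intro i hi hai hif; omega

theorem front_stop (l : List Char) (c : Char) (a : Nat) (hf : pvFront l c a < l.length) :
    l[pvFront l c a]'(hf) ≠ c := by
  fun_induction pvFront l c a with
  | case1 a ha hc ih => exact ih hf
  | case2 a ha hc => simpa using hc
  | case3 a ha => omega
theorem back_le (l : List Char) (c : Char) (b : Nat) (h : b ≤ l.length) : pvBack l c b ≤ l.length := by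
  fun_induction pvBack l c b <;> omega

theorem back_mem (l : List Char) (c : Char) (b : Nat) :
    ∀ i (hi : l.length - 1 - i < l.length), b ≤ i → i < pvBack l c b → l[l.length - 1 - i] = c := by
  fun_induction pvBack l c b with
  | case1 b hb hc ih =>
      intro i hi hbi hib
      rcases Nat.eq_or_lt_of_le hbi with rfl | hlt
      · exact hc
      · exact ih i hi hlt hib
  | case2 b hb hc => intro i hi hbi hib; omega
  | case3 b hb => intro i hi hbi hib; omega

theorem back_stop (l : List Char) (c : Char) (b : Nat) (hf : pvBack l c b < l.length) :
    l.getD (l.length - 1 - pvBack l c b) 'a' ≠ c := by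
  fun_induction pvBack l c b with
  | case1 b hb hc ih => exact ih hf
  | case2 b hb hc => rw [List.getD_eq_getElem l 'a' (by omega)]; simpa using hc
  | case3 b hb => omega

-- the slice condition of A's loop, for 1 ≤ j, is take/drop equality
theorem cond_iff (l : List Char) (j : Nat) (hj : 1 ≤ j) :
    (PySem.List.slice l (some 0) (some (j : Int)) = PySem.List.slice l (some (-(j : Int))) none)
      ↔ l.take j = l.drop (l.length - j) := by
  rw [PySem.List.slice_zero_start, PySem.List.slice_to_natCast,
      PySem.List.slice_from_neg_natCast l j hj]

theorem take_eq_drop (l : List Char) (c : Char) (j : Nat) (hjn : j ≤ l.length)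
    (hall : ∀ i (hi : i < l.length), (i < j ∨ l.length - j ≤ i) → l[i] = c) :
    l.take j = l.drop (l.length - j) := by
  apply List.ext_getElem
  · simp; omega
  · intro i h1 h2
    rw [List.getElem_take, List.getElem_drop]
    rw [hall i (by simp at h1; omega) (by simp at h1; omega),
        hall (l.length - j + i) (by simp at h2; omega) (by simp at h1 h2; omega)]
theorem aLoop_zero (l : List Char)
    (h0 : ∀ j, 1 ≤ j → j ≤ l.length → l.take j = l.drop (l.length - j)) :
    ∀ j, 1 ≤ j → pvALoop l j = 0 := by
  intro j
  fun_induction pvALoop l j with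
  | case1 j hle hcond ih => intro hj; exact ih (by omega)
  | case2 j hle hcond => intro hj; exact absurd ((cond_iff l j hj).mpr (h0 j hj hle)) hcond
  | case3 j hle => intro _; rfl

theorem aLoop_stop (l : List Char) (m : Nat) (hm : m + 1 ≤ l.length)
    (heqs : ∀ j, 1 ≤ j → j ≤ m → l.take j = l.drop (l.length - j))
    (hne : ¬ (l.take (m + 1) = l.drop (l.length - (m + 1)))) :
    ∀ j, 1 ≤ j → j ≤ m + 1 → pvALoop l j = (m : Int) := by
  intro j
  fun_induction pvALoop l j with
  | case1 j hle hcond ih =>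
      intro hj1 hjm
      have hj : j ≤ m := by
        by_contra h
        have : j = m + 1 := by omega
        subst this
        exact hne ((cond_iff l (m + 1) (by omega)).mp hcond)
      exact ih (by omega) (by omega)
  | case2 j hle hcond =>
      intro hj1 hjm
      have : j = m + 1 := by
        by_contra h
        exact hcond ((cond_iff l j hj1).mpr (heqs j hj1 (by omega)))
      subst this
      push_cast; ring
  | case3 j hle => intro hj1 hjm; omega
theorem pv_key (l : List Char) :
    pvALoop l 1 =
      (if l.length = 0 then 0
       else if pvFront l l.headI 0 = l.length then (0 : Int)
       else ((min (pvFront l l.headI 0) (pvBack l l.headI 0) : Nat) : Int)) := by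
  by_cases hn : l.length = 0
  · have hl : l = [] := List.length_eq_zero_iff.mp hn
    subst hl
    rw [pvALoop]; simp
  · rw [if_neg hn]
    have hl0 : 0 < l.length := Nat.pos_of_ne_zero hn
    set c := l.headI with hc
    have hc0 : l.getD 0 'a' = c := by
      cases l with
      | nil => simp at hl0
      | cons x t => simp [hc]
    set F := pvFront l c 0 with hF
    set B := pvBack l c 0 with hB
    have hFle : F ≤ l.length := front_le l c 0 (by omega)
    have hBle : B ≤ l.length := back_le l c 0 (by omega)
    have hfm : ∀ i (hi : i < l.length), i < F → l[i] = c :=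
      fun i hi h2 => front_mem l c 0 i hi (Nat.zero_le _) h2
    have hbm : ∀ i, i < B → l.getD (l.length - 1 - i) 'a' = c := by
      intro i h2
      rw [List.getD_eq_getElem l 'a' (by omega)]
      exact back_mem l c 0 i (by omega) (Nat.zero_le _) h2
    by_cases hFn : F = l.length
    · rw [if_pos hFn]
      apply aLoop_zero _ _ 1 le_rfl
      intro j hj hjle
      apply take_eq_drop l c j hjle
      intro i hi _
      exact hfm i hi (by omega)
    · rw [if_neg hFn]
      have hFlt : F < l.length := by omega
      have hFs : l.getD F 'a' ≠ c := by
        rw [List.getD_eq_getElem l 'a' hFlt]; exact front_stop l c 0 hFlt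
      have hBlt : B < l.length := by
        by_contra h
        have := hbm (l.length - 1 - F) (by omega)
        rw [show l.length - 1 - (l.length - 1 - F) = F from by omega] at this
        exact hFs this
      have hBs : l.getD (l.length - 1 - B) 'a' ≠ c := back_stop l c 0 hBlt
      set m := min F B with hm
      apply aLoop_stop l m (by omega) ?_ ?_ 1 le_rfl (by omega)
      · intro j hj1 hjm
        apply take_eq_drop l c j (by omega)
        intro i hi hcase
        rcases hcase with h | h
        · exact hfm i hi (by omega)
        · have hbc := hbm (l.length - 1 - i) (by omega)
          rw [show l.length - 1 - (l.length - 1 - i) = i from by omega,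
              List.getD_eq_getElem l 'a' hi] at hbc
          exact hbc
      · intro heq
        have hgets : ∀ i, i < m + 1 → l[i]? = l[l.length - (m + 1) + i]? := by
          intro i hi
          have h1 := congrArg (fun t => t[i]?) heq
          simpa [List.getElem?_take, List.getElem?_drop, hi] using h1
        have hgd : ∀ i, i < m + 1 → l.getD i 'a' = l.getD (l.length - (m + 1) + i) 'a' := by
          intro i hi
          simp [List.getD_eq_getElem?_getD, hgets i hi]
        rcases Nat.lt_or_ge F B with hFB | hBF
        · have h1 := hgd m (by omega)
          rw [show l.length - (m + 1) + m = l.length - 1 - 0 from by omega] at h1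
          have h2 := hbm 0 (by omega)
          rw [show m = F from by omega] at h1
          exact hFs (h1.trans h2)
        · have h0 := hgd 0 (by omega)
          rw [show l.length - (m + 1) + 0 = l.length - 1 - B from by omega] at h0
          exact hBs (h0 ▸ hc0)

-- ===== VERDICT (by name: the statement is the Claim_ definition above) =====
theorem get_position_next_value_spec : Claim_equal_get_position_next_value := by
  intro s position _
  unfold Spec_get_position_next_value get_position_next_value get_position_next_value_alt
  exact pv_key (PySem.List.slice s.toList none (some position))
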